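-- pv_equiv track=rewrite | github.com/ErManoj-Sharma/Practice_Programs | advent_of_code_2015/day 20/20.py | get_giftp2
-- ===== SOURCE A (Python) =====
-- def get_giftp2(house_number):
--     gift = 0
--     i = 1
--     while i <= house_number:
--         if house_number < i * 50:
--             if house_number / i > 0 and house_number % i == 0:
--                 gift = gift + 11*i
--         i = i+1
--     return gift
-- ===== SOURCE B (Python) =====
-- def get_giftp2(house_number):
--     # A sums 11*i over divisors i of house_number with 50*i > house_number.
--     # Such divisors correspond one-to-one to cofactors q = house_number // i with q < 50,
--     # so loop over the fewer than fifty possible cofactors instead: O(1) instead of O(n).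
--     if house_number <= 0:
--         return 0
--     total = 0
--     for q in range(1, 50):
--         if house_number % q == 0:
--             total += 11 * (house_number // q)
--     return total
-- ===== Notes on version B (the rewrite author's own statement) =====
-- stated objective: faster
-- what changed: Replaces A's O(n) scan of all i up to house_number with a loop over the boundedly many cofactors q = house_number // i (a divisor i satisfies 50*i > house_number iff its cofactor is below 50), making it O(1).
import Mathlib
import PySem

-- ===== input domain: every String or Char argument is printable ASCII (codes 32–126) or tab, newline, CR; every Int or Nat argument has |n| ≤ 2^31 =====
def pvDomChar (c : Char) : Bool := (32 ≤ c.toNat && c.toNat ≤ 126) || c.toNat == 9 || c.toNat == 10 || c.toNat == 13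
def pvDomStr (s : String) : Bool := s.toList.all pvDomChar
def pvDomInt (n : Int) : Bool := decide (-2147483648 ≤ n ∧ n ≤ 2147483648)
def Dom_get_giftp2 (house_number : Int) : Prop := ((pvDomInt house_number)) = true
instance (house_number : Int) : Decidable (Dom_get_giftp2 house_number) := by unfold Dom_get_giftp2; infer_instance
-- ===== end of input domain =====

-- B replaces A's O(n) scan of all i ≤ house_number with a loop over the boundedly many cofactors q = n // i (those below 50): O(1).

-- ===== PORT A =====
-- while i <= house_number: …; i = i + 1   (structural recursion on the remaining iterations)
-- 'house_number / i > 0' is Python float division; for i ≠ 0 it holds iff house_number * i > 0 (exact: no rounding to 0 for |n|,|i| ≤ 2^31).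
def getGiftp2Loop (house_number : Int) (i : Int) (gift : Int) : Int :=
  if i ≤ house_number then
    getGiftp2Loop house_number (i + 1)
      (if house_number < i * 50 then
        (if 0 < house_number * i ∧ PySem.Int.mod house_number i = 0 then gift + 11 * i else gift)
       else gift)
  else gift
termination_by (house_number + 1 - i).toNat
decreasing_by omega

def get_giftp2 (house_number : Int) : Int :=
  getGiftp2Loop house_number 1 0

-- ===== PORT B =====
def get_giftp2_alt (house_number : Int) : Int :=
  if house_number ≤ 0 then 0
  else
    (PySem.List.pyRange 1 50 1).foldl
      (fun total q =>
        if PySem.Int.mod house_number q = 0 then total + 11 * PySem.Int.floordiv house_number q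
        else total) 0

-- ===== PRECONDITION & SPEC =====
def Spec_get_giftp2 (house_number : Int) (out : Int) : Prop := out = get_giftp2_alt house_number
instance (house_number : Int) (out : Int) : Decidable (Spec_get_giftp2 house_number out) := by unfold Spec_get_giftp2; infer_instance

-- ===== CLAIM (what is proved, stated in full; the proofs are below) =====
def Claim_equal_get_giftp2 : Prop := ∀ (house_number : Int), Dom_get_giftp2 house_number → Spec_get_giftp2 house_number (get_giftp2 house_number)

-- ===== LEMMAS AND PROOFS =====

-- the summand of A's loop, for n > 0 (where 0 < n * i and mod n i = 0 simplify away)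
def fA (n i : Int) : Int := if n < i * 50 ∧ i ∣ n then 11 * i else 0

lemma getGiftp2Loop_eq_sum (n : Int) (hn : 0 < n) :
    ∀ i g, 1 ≤ i → getGiftp2Loop n i g = g + ∑ k ∈ Finset.Icc i n, fA n k := by
  have key : ∀ (m : Nat) (i g : Int), (n + 1 - i).toNat ≤ m → 1 ≤ i →
      getGiftp2Loop n i g = g + ∑ k ∈ Finset.Icc i n, fA n k := by
    intro m
    induction m with
    | zero =>
      intro i g hm hi
      have hni : n < i := by omega
      rw [getGiftp2Loop, if_neg (by omega), Finset.Icc_eq_empty (by omega), Finset.sum_empty,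
        add_zero]
    | succ m ih =>
      intro i g hm hi
      by_cases h : i ≤ n
      · rw [getGiftp2Loop, if_pos h, ih (i + 1) _ (by omega) (by omega)]
        rw [← Finset.insert_Icc_add_one_left_eq_Icc h, Finset.sum_insert (by simp)]
        have hpos : 0 < n * i := mul_pos hn (by omega)
        by_cases hc : n < i * 50
        · rw [if_pos hc]
          by_cases hd : i ∣ n
          · rw [if_pos ⟨hpos, (PySem.Int.mod_eq_zero_iff_dvd n i).mpr hd⟩]
            have : fA n i = 11 * i := if_pos ⟨hc, hd⟩
            rw [this]; ring
          · rw [if_neg (by simp [PySem.Int.mod_eq_zero_iff_dvd, hd])]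
            have : fA n i = 0 := if_neg (by tauto)
            rw [this]; ring
        · rw [if_neg hc]
          have : fA n i = 0 := if_neg (by tauto)
          rw [this]; ring
      · rw [getGiftp2Loop, if_neg h, Finset.Icc_eq_empty (by omega), Finset.sum_empty, add_zero]
  intro i g hi
  exact key (n + 1 - i).toNat i g le_rfl hi

lemma alt_eq_sum (n : Int) (hn : 0 < n) :
    get_giftp2_alt n = ∑ q ∈ Finset.Icc (1:Int) 49, (if q ∣ n then 11 * (n / q) else 0) := by
  unfold get_giftp2_alt
  rw [if_neg (by omega)]
  have hfun : (fun (total q : Int) =>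
      if PySem.Int.mod n q = 0 then total + 11 * PySem.Int.floordiv n q else total)
      = (fun total q => total +
          (if PySem.Int.mod n q = 0 then 11 * PySem.Int.floordiv n q else 0)) := by
    funext t q; split <;> simp
  rw [hfun, PySem.List.foldl_add, zero_add,
    ← List.sum_toFinset _ (PySem.List.nodup_pyRange_one 1 50)]
  have hset : (PySem.List.pyRange 1 50 1).toFinset = Finset.Icc (1:Int) 49 := by
    ext x
    simp [PySem.List.mem_pyRange_one]
    omega
  rw [hset]
  refine Finset.sum_congr rfl (fun q hq => ?_)
  have hq1 : 1 ≤ q := (Finset.mem_Icc.mp hq).1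
  simp only [PySem.Int.mod_eq_zero_iff_dvd,
    PySem.Int.floordiv_eq_ediv_of_pos (show (0:Int) < q by omega)]

lemma sum_bij_div (n : Int) (hn : 0 < n) :
    ∑ k ∈ Finset.Icc (1:Int) n, fA n k
      = ∑ q ∈ Finset.Icc (1:Int) 49, (if q ∣ n then 11 * (n / q) else 0) := by
  unfold fA
  rw [← Finset.sum_filter, ← Finset.sum_filter]
  refine Finset.sum_nbij' (fun i => n / i) (fun q => n / q) ?_ ?_ ?_ ?_ ?_
  · intro a ha
    simp only [Finset.mem_filter, Finset.mem_Icc] at ha ⊢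
    obtain ⟨⟨h1, h2⟩, h3, c, hc⟩ := ha
    have hdiv : n / a = c := by rw [hc, Int.mul_ediv_cancel_left _ (by omega : a ≠ 0)]
    have hc1 : 1 ≤ c := by nlinarith
    rw [hdiv]
    exact ⟨⟨hc1, by nlinarith⟩, a, by rw [hc]; ring⟩
  · intro q hq
    simp only [Finset.mem_filter, Finset.mem_Icc] at hq ⊢
    obtain ⟨⟨h1, h2⟩, c, hc⟩ := hq
    have hdiv : n / q = c := by rw [hc, Int.mul_ediv_cancel_left _ (by omega : q ≠ 0)]
    have hc1 : 1 ≤ c := by nlinarith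
    rw [hdiv]
    exact ⟨⟨hc1, by nlinarith⟩, by nlinarith, q, by rw [hc]; ring⟩
  · intro a ha
    simp only [Finset.mem_filter, Finset.mem_Icc] at ha
    obtain ⟨⟨h1, h2⟩, h3, c, hc⟩ := ha
    have hdiv : n / a = c := by rw [hc, Int.mul_ediv_cancel_left _ (by omega : a ≠ 0)]
    have hc1 : 1 ≤ c := by nlinarith
    show n / (n / a) = a
    rw [hdiv, hc, mul_comm, Int.mul_ediv_cancel_left _ (by omega : c ≠ 0)]
  · intro q hq
    simp only [Finset.mem_filter, Finset.mem_Icc] at hq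
    obtain ⟨⟨h1, h2⟩, c, hc⟩ := hq
    have hdiv : n / q = c := by rw [hc, Int.mul_ediv_cancel_left _ (by omega : q ≠ 0)]
    have hc1 : 1 ≤ c := by nlinarith
    show n / (n / q) = q
    rw [hdiv, hc, mul_comm, Int.mul_ediv_cancel_left _ (by omega : c ≠ 0)]
  · intro a ha
    simp only [Finset.mem_filter, Finset.mem_Icc] at ha
    obtain ⟨⟨h1, h2⟩, h3, c, hc⟩ := ha
    have hdiv : n / a = c := by rw [hc, Int.mul_ediv_cancel_left _ (by omega : a ≠ 0)]
    have hc1 : 1 ≤ c := by nlinarith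
    show 11 * a = 11 * (n / (n / a))
    rw [hdiv, hc, Int.mul_ediv_cancel _ (by omega : c ≠ 0)]

-- ===== VERDICT (by name: the statement is the Claim_ definition above) =====
theorem get_giftp2_spec : Claim_equal_get_giftp2 := by
  intro n _
  unfold Spec_get_giftp2 get_giftp2
  by_cases hn : 0 < n
  · rw [getGiftp2Loop_eq_sum n hn 1 0 le_rfl, alt_eq_sum n hn, zero_add, sum_bij_div n hn]
  · rw [getGiftp2Loop, if_neg (by omega)]
    unfold get_giftp2_alt
    rw [if_pos (by omega)]
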